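-- pv_equiv track=rewrite | github.com/RiceWa/phrase-search | file_parser.py | merge_captions
-- ===== SOURCE A (Python) =====
-- def merge_captions(captions, time_threshold=5):
--     """
--     Merges consecutive captions within a given time threshold.
--
--     Args:
--         captions (list): List of tuples (timestamp, caption_text).
--         time_threshold (int): Max time difference (in seconds) to allow merging.
--     Returns:
--         list: List of merged captions.
--     """
--     merged = []
--     if not captions:
--         return merged
--
--     current_timestamp, current_text = captions[0]
--
--     for timestamp, text in captions[1:]:
--         # Calculate time difference
--         time_difference = timestamp - current_timestamp
--
--         # Merge captions if time difference is within threshold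
--         if time_difference <= time_threshold:
--             current_text = f"{current_text} {text}".strip()
--         else:
--             # Save the current caption and start a new one
--             merged.append((current_timestamp, current_text))
--             current_timestamp, current_text = timestamp, text
--
--     # Add the last caption
--     merged.append((current_timestamp, current_text))
--     return merged
-- ===== SOURCE B (Python) =====
-- def merge_captions(captions, time_threshold=5):
--     """
--     Merges consecutive captions within a given time threshold.
--
--     Two-pass version: first partition the captions into groups (a new group
--     opens when a timestamp is more than time_threshold past the group's
--     START timestamp), then reduce each group's texts into one caption.
--     """
--     if not captions:
--         return []
--     # Pass 1: partition into groups of consecutive captions.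
--     groups = []
--     i = 0
--     n = len(captions)
--     while i < n:
--         start_ts = captions[i][0]
--         j = i + 1
--         while j < n and captions[j][0] - start_ts <= time_threshold:
--             j += 1
--         groups.append((start_ts, [text for _, text in captions[i:j]]))
--         i = j
--     # Pass 2: reduce each group to a single (timestamp, text) pair.
--     result = []
--     for ts, texts in groups:
--         acc = texts[0]
--         for t in texts[1:]:
--             acc = f"{acc} {t}".strip()
--         result.append((ts, acc))
--     return result
-- ===== Notes on version B (the rewrite author's own statement) =====
-- stated objective: alternative
-- what changed: Replaces A's single stateful fold (mutable current timestamp/text/accumulator) by two passes: partition the captions into groups keyed by the group's start timestamp, then reduce each group's texts to one caption.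
import Mathlib
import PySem

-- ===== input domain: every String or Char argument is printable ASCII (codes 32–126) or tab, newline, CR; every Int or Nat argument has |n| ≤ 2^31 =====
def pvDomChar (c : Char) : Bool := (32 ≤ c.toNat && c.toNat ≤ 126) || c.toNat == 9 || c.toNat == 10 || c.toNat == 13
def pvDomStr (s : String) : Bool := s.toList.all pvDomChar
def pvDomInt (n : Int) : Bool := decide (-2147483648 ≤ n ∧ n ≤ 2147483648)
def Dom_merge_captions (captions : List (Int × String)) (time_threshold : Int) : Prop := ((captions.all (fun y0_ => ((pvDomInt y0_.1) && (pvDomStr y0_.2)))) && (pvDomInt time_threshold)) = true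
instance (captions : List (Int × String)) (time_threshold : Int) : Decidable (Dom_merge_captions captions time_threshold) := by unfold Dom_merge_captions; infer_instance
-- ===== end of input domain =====

-- B rewrites A's single stateful fold as two passes (group then reduce); alternative decomposition, same cost.

-- ===== PORT A =====
-- A: one fold over captions[1:] carrying (merged, current_timestamp, current_text).
def merge_captions (captions : List (Int × String)) (time_threshold : Int) : List (Int × String) :=
  match captions with
  | [] => []
  | (t0, x0) :: rest =>
    let st := rest.foldl
      (fun (s : List (Int × String) × Int × String) p =>
        if p.1 - s.2.1 ≤ time_threshold then
          (s.1, s.2.1, PySem.Str.strip (s.2.2 ++ " " ++ p.2))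
        else
          (s.1 ++ [(s.2.1, s.2.2)], p.1, p.2))
      ([], t0, x0)
    st.1 ++ [(st.2.1, st.2.2)]

-- ===== PORT B =====
-- B pass 1: partition into groups; a group is its start timestamp plus all its texts
-- (the inner while-scan of Source B becomes takeWhile/dropWhile on the remaining list).
def pvGroups (time_threshold : Int) : List (Int × String) → List (Int × List String)
  | [] => []
  | (t, x) :: rest =>
    (t, x :: (rest.takeWhile (fun p => p.1 - t ≤ time_threshold)).map Prod.snd)
      :: pvGroups time_threshold (rest.dropWhile (fun p => p.1 - t ≤ time_threshold))
termination_by l => l.length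
decreasing_by simp only [List.length_cons]; exact Nat.lt_succ_of_le (List.length_dropWhile_le _ _)

-- B pass 2: reduce one group's texts (texts are nonempty by construction; "" is unreachable).
def pvReduce : List String → String
  | [] => ""
  | x :: rest => rest.foldl (fun acc t => PySem.Str.strip (acc ++ " " ++ t)) x

def merge_captions_alt (captions : List (Int × String)) (time_threshold : Int) : List (Int × String) :=
  (pvGroups time_threshold captions).map (fun g => (g.1, pvReduce g.2))

-- ===== PRECONDITION & SPEC =====
def Spec_merge_captions (captions : List (Int × String)) (time_threshold : Int) (out : List (Int × String)) : Prop := out = merge_captions_alt captions time_threshold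
instance (captions : List (Int × String)) (time_threshold : Int) (out : List (Int × String)) : Decidable (Spec_merge_captions captions time_threshold out) := by unfold Spec_merge_captions; infer_instance

-- ===== CLAIM (what is proved, stated in full; the proofs are below) =====
def Claim_equal_merge_captions : Prop := ∀ (captions : List (Int × String)) (time_threshold : Int), Dom_merge_captions captions time_threshold → Spec_merge_captions captions time_threshold (merge_captions captions time_threshold)

-- ===== LEMMAS AND PROOFS =====

theorem pvGroups_nil (th : Int) : pvGroups th [] = [] := by
  rw [pvGroups]

theorem pvGroups_cons (th t : Int) (x : String) (rest : List (Int × String)) :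
    pvGroups th ((t, x) :: rest)
      = (t, x :: (rest.takeWhile (fun p => p.1 - t ≤ th)).map Prod.snd)
          :: pvGroups th (rest.dropWhile (fun p => p.1 - t ≤ th)) := by
  rw [pvGroups]

-- Loop invariant: A's fold from state (merged, ct, cx) over l produces merged followed by
-- B's processing of the virtual list (ct, cx) :: l.
theorem pv_loop_eq (th : Int) (l : List (Int × String)) :
    ∀ (ct : Int) (cx : String) (merged : List (Int × String)),
    (let st := l.foldl
      (fun (s : List (Int × String) × Int × String) p =>
        if p.1 - s.2.1 ≤ th then
          (s.1, s.2.1, PySem.Str.strip (s.2.2 ++ " " ++ p.2))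
        else
          (s.1 ++ [(s.2.1, s.2.2)], p.1, p.2))
      (merged, ct, cx)
     st.1 ++ [(st.2.1, st.2.2)])
    = merged ++ (pvGroups th ((ct, cx) :: l)).map (fun g => (g.1, pvReduce g.2)) := by
  induction l with
  | nil =>
    intro ct cx merged
    simp [pvGroups_nil, pvGroups_cons, pvReduce]
  | cons p rest ih =>
    intro ct cx merged
    obtain ⟨t, x⟩ := p
    by_cases h : t - ct ≤ th
    · have := ih ct (PySem.Str.strip (cx ++ " " ++ x)) merged
      simp only [List.foldl_cons, if_pos h] at *
      rw [this]
      have h' : t ≤ th + ct := by omega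
      simp [pvGroups_cons, h', pvReduce]
    · have := ih t x (merged ++ [(ct, cx)])
      simp only [List.foldl_cons, if_neg h] at *
      rw [this]
      have h' : ¬ t ≤ th + ct := by omega
      simp [pvGroups_cons, h', pvReduce]

-- ===== VERDICT (by name: the statement is the Claim_ definition above) =====
theorem merge_captions_spec : Claim_equal_merge_captions := by
  intro captions th _
  unfold Spec_merge_captions merge_captions merge_captions_alt
  match captions with
  | [] => simp [pvGroups_nil]
  | (t0, x0) :: rest => exact pv_loop_eq th rest t0 x0 []
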